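-- pv_equiv track=rewrite | github.com/Jacky-lim-data-analyst/project_euler_sol | cyclical_figurate_numbers.py | generate_figurate_numbers
-- ===== SOURCE A (Python) =====
-- def generate_figurate_numbers(s, digits=4):
--     """Generate s-gonal numbers with the specified number of digits."""
--     results = []
--     n = 1
--
--     while True:
--         if s == 3:      # triangular
--             num = n * (n + 1) // 2
--         elif s == 4:    # square
--             num = n ** 2
--         elif s == 5:    # pentagonal
--             num = n * (3 * n - 1) // 2
--         elif s == 6:
--             num = n * (2 * n - 1)
--         elif s == 7:
--             num = n * (5 * n - 3) // 2
--         elif s == 8: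
--             num = n * (3 * n - 2)
--         else:
--             raise ValueError(f"invalid polygonal type: {s}")
--
--         if num >= 10**(digits - 1) and num < 10**digits:
--             results.append(num)
--         elif num >= 10**digits:
--             break
--
--         n += 1
--
--     return results
-- ===== SOURCE B (Python) =====
-- def generate_figurate_numbers(s, digits=4):
--     """Generate s-gonal numbers with the specified number of digits.
--
--     Instead of scanning n = 1, 2, 3, ... and testing each value, locate the
--     first index whose polygonal value reaches each decimal bound by binary
--     search (the polygonal values are strictly increasing), then emit the
--     contiguous block of values directly.
--     """
--     if not (3 <= s <= 8):
--         raise ValueError(f"invalid polygonal type: {s}")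
--
--     lo = 10 ** (digits - 1)
--     hi = 10 ** digits
--
--     def P(n):
--         return ((s - 2) * n * n - (s - 4) * n) // 2
--
--     def first_at_least(t):
--         # smallest n >= 1 with P(n) >= t; valid because P(n) >= n for n >= 1
--         a, b = 1, max(t, 1)
--         while a < b:
--             m = (a + b) // 2
--             if P(m) >= t:
--                 b = m
--             else:
--                 a = m + 1
--         return a
--
--     return [P(n) for n in range(first_at_least(lo), first_at_least(hi))]
-- ===== Notes on version B (the rewrite author's own statement) =====
-- stated objective: faster
-- what changed: A scans n = 1, 2, 3, ... computing each polygonal value and testing it against both decimal bounds; B binary-searches for the first index reaching each bound (the polygonal values are strictly increasing) and emits the contiguous block of values directly, skipping the whole prefix below 10**(digits-1).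
import Mathlib
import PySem

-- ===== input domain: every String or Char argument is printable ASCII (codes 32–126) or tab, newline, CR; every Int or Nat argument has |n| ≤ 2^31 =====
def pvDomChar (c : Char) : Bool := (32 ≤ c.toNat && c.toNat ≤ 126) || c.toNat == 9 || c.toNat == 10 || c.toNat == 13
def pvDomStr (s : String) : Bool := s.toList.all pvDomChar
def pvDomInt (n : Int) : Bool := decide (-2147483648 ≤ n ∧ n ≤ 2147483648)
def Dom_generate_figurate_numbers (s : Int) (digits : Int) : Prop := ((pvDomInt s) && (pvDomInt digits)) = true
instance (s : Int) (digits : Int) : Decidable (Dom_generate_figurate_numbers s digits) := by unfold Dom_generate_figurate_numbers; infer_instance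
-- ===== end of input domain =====

-- B replaces A's linear scan from n = 1 with binary searches for the first index reaching each
-- decimal bound, then emits the contiguous block of polygonal values directly (measured faster).


-- ===== PORT A =====
-- 10**d.  Exact port of Python's bound for digits ≥ 1; for d ≤ 0 Python's 10**d is a float
-- below 1, both bounds are < 1 ≤ every generated value, and A returns [] — which this port
-- (where both bounds collapse to 1) reproduces exactly.
def pvPow10 (d : Int) : Int := (10 : Int) ^ d.toNat

-- the if/elif chain computing num; none = the 'raise ValueError' branch
def pvNumA (s n : Int) : Option Int :=
  if s = 3 then some (PySem.Int.floordiv (n * (n + 1)) 2)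
  else if s = 4 then some (n ^ 2)
  else if s = 5 then some (PySem.Int.floordiv (n * (3 * n - 1)) 2)
  else if s = 6 then some (n * (2 * n - 1))
  else if s = 7 then some (PySem.Int.floordiv (n * (5 * n - 3)) 2)
  else if s = 8 then some (n * (3 * n - 2))
  else none

-- the while-True loop; the 'lim2 ≤ n' guard only makes the recursion total: whenever the loop
-- is reachable (s ∈ 3..8, n ≥ 1) we have num ≥ n, so Python's own 'num >= 10**digits' break
-- fires there too and also returns acc.  none from pvNumA = Python raises (excluded by Pre_).
def pvLoopA (s lim1 lim2 n : Int) (acc : List Int) : List Int :=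
  if lim2 ≤ n then acc
  else
    match pvNumA s n with
    | none => acc
    | some num =>
      if lim1 ≤ num ∧ num < lim2 then pvLoopA s lim1 lim2 (n + 1) (acc ++ [num])
      else if lim2 ≤ num then acc
      else pvLoopA s lim1 lim2 (n + 1) acc
termination_by (lim2 - n).toNat
decreasing_by all_goals omega

def generate_figurate_numbers (s : Int) (digits : Int) : List Int :=
  pvLoopA s (pvPow10 (digits - 1)) (pvPow10 digits) 1 []

-- ===== PORT B =====
-- P(n) = ((s-2)*n*n - (s-4)*n) // 2
def pvP (s n : Int) : Int := PySem.Int.floordiv ((s - 2) * n * n - (s - 4) * n) 2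

-- the while a < b binary-search loop of first_at_least
def pvBS (s t a b : Int) : Int :=
  if _h : a < b then
    let m := PySem.Int.floordiv (a + b) 2
    if t ≤ pvP s m then pvBS s t a m else pvBS s t (m + 1) b
  else a
termination_by (b - a).toNat
decreasing_by
  all_goals
    have h1 : a ≤ PySem.Int.floordiv (a + b) 2 := by
      rw [PySem.Int.le_floordiv_iff_mul_le (by norm_num)]; omega
    have h2 : PySem.Int.floordiv (a + b) 2 < b := by
      rw [PySem.Int.floordiv_lt_iff_lt_mul (by norm_num)]; omega
    omega

def pvFirstAtLeast (s t : Int) : Int := pvBS s t 1 (max t 1)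

-- the 3 <= s <= 8 check (Python raises otherwise; excluded by Pre_), then the comprehension
def generate_figurate_numbers_alt (s : Int) (digits : Int) : List Int :=
  if 3 ≤ s ∧ s ≤ 8 then
    (PySem.List.pyRange (pvFirstAtLeast s (pvPow10 (digits - 1)))
      (pvFirstAtLeast s (pvPow10 digits))).map (pvP s)
  else []

-- ===== PRECONDITION & SPEC =====
-- exactly the inputs where Python A returns: for s outside 3..8 the very first loop iteration raises ValueError
def Pre_generate_figurate_numbers (s : Int) (digits : Int) : Prop := 3 ≤ s ∧ s ≤ 8
instance (s : Int) (digits : Int) : Decidable (Pre_generate_figurate_numbers s digits) := by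
  unfold Pre_generate_figurate_numbers; infer_instance

def pvWitness_generate_figurate_numbers : Int × Int := (5, 3)

def Spec_generate_figurate_numbers (s : Int) (digits : Int) (out : List Int) : Prop :=
  out = generate_figurate_numbers_alt s digits
instance (s : Int) (digits : Int) (out : List Int) : Decidable (Spec_generate_figurate_numbers s digits out) := by
  unfold Spec_generate_figurate_numbers; infer_instance

-- ===== CLAIM (what is proved, stated in full; the proofs are below) =====
def Claim_equal_generate_figurate_numbers : Prop := ∀ (s : Int) (digits : Int), Dom_generate_figurate_numbers s digits → Pre_generate_figurate_numbers s digits → Spec_generate_figurate_numbers s digits (generate_figurate_numbers s digits)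

-- ===== LEMMAS AND PROOFS =====

-- the polygonal numerator is always even, so pvP is exact division by 2
lemma two_mul_pvP (s n : Int) : 2 * pvP s n = (s - 2) * n * n - (s - 4) * n := by
  obtain ⟨k, hk⟩ := Int.even_mul_pred_self n
  have hx : (s - 2) * n * n - (s - 4) * n = 2 * ((s - 2) * k + n) := by
    have hk' : n * (n - 1) = k + k := hk
    linear_combination (s - 2) * hk'
  unfold pvP
  rw [hx, PySem.Int.floordiv_eq_ediv_of_pos (by norm_num),
    Int.mul_ediv_cancel_left _ (by norm_num : (2:Int) ≠ 0)]

lemma pvP_ge_self (s n : Int) (hs : 3 ≤ s) (hn : 1 ≤ n) : n ≤ pvP s n := by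
  have h := two_mul_pvP s n
  have key : 0 ≤ (s - 2) * (n * (n - 1)) :=
    mul_nonneg (by omega) (mul_nonneg (by omega) (by omega))
  nlinarith [h, key]

lemma pvP_mono (s a b : Int) (hs : 3 ≤ s) (ha : 1 ≤ a) (hab : a ≤ b) :
    pvP s a ≤ pvP s b := by
  have h1 := two_mul_pvP s a
  have h2 := two_mul_pvP s b
  have hmul : (s - 2) * 2 ≤ (s - 2) * (a + b) :=
    mul_le_mul_of_nonneg_left (by omega) (by omega)
  have key : 0 ≤ (b - a) * ((s - 2) * (a + b) - (s - 4)) :=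
    mul_nonneg (by omega) (by linarith)
  have hdiff : 2 * pvP s b - 2 * pvP s a = (b - a) * ((s - 2) * (a + b) - (s - 4)) := by
    linear_combination h2 - h1
  linarith

lemma pvNumA_eq (s n : Int) (hs3 : 3 ≤ s) (hs8 : s ≤ 8) :
    pvNumA s n = some (pvP s n) := by
  have h := two_mul_pvP s n
  interval_cases s <;> simp only [pvNumA, reduceIte] <;> refine congrArg some ?_
  · unfold pvP; congr 1; ring
  · ring_nf at h ⊢; omega
  · unfold pvP; congr 1; ring
  · ring_nf at h ⊢; omega
  · unfold pvP; congr 1; ring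
  · ring_nf at h ⊢; omega

-- binary-search loop invariant: result r has 1 ≤ r, t ≤ P r, and P k < t below r
lemma pvBS_spec (s t : Int) (hs : 3 ≤ s) :
    ∀ (N : Nat) (a b : Int), (b - a).toNat ≤ N → 1 ≤ a → a ≤ b → t ≤ pvP s b →
      (∀ k, 1 ≤ k → k < a → pvP s k < t) →
      1 ≤ pvBS s t a b ∧ t ≤ pvP s (pvBS s t a b) ∧
        (∀ k, 1 ≤ k → k < pvBS s t a b → pvP s k < t) := by
  intro N
  induction N with
  | zero =>
    intro a b hN ha hab hb hlow
    have hba : b = a := by omega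
    rw [pvBS]
    simp only [hba, lt_irrefl, dite_false]
    exact ⟨ha, hba ▸ hb, hlow⟩
  | succ N ih =>
    intro a b hN ha hab hb hlow
    rw [pvBS]
    by_cases hlt : a < b
    · simp only [hlt, dite_true]
      set m := PySem.Int.floordiv (a + b) 2 with hm
      have ham : a ≤ m := by
        rw [hm, PySem.Int.le_floordiv_iff_mul_le (by norm_num)]; omega
      have hmb : m < b := by
        rw [hm, PySem.Int.floordiv_lt_iff_lt_mul (by norm_num)]; omega
      by_cases hc : t ≤ pvP s m
      · simp only [hc, if_true]
        exact ih a m (by omega) ha ham hc hlow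
      · simp only [hc, if_false]
        refine ih (m + 1) b (by omega) (by omega) (by omega) hb ?_
        intro k hk hkm
        by_cases hka : k < a
        · exact hlow k hk hka
        · have : pvP s k ≤ pvP s m := pvP_mono s k m hs hk (by omega)
          omega
    · simp only [hlt, dite_false]
      have hba : b = a := by omega
      exact ⟨ha, hba ▸ hb, hlow⟩

lemma pvFirstAtLeast_spec (s t : Int) (hs : 3 ≤ s) :
    1 ≤ pvFirstAtLeast s t ∧ t ≤ pvP s (pvFirstAtLeast s t) ∧
      (∀ k, 1 ≤ k → k < pvFirstAtLeast s t → pvP s k < t) := by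
  unfold pvFirstAtLeast
  refine pvBS_spec s t hs (max t 1 - 1).toNat 1 (max t 1) (by omega) le_rfl (by omega)
    ?_ (by intro k hk hk1; omega)
  calc t ≤ max t 1 := le_max_left t 1
    _ ≤ pvP s (max t 1) := pvP_ge_self s _ hs (by omega)

-- the while loop from index n collects exactly the block [max n r1, max n r2) mapped through P
lemma pvLoopA_eq (s lo hi r1 r2 : Int) (hs3 : 3 ≤ s) (hs8 : s ≤ 8)
    (_hr1 : 1 ≤ r1) (hr12 : r1 ≤ r2) (hr2hi : r2 ≤ hi)
    (hlo : ∀ n, 1 ≤ n → (lo ≤ pvP s n ↔ r1 ≤ n))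
    (hhi : ∀ n, 1 ≤ n → (hi ≤ pvP s n ↔ r2 ≤ n)) :
    ∀ (N : Nat) (n : Int) (acc : List Int), (r2 - n).toNat ≤ N → 1 ≤ n →
      pvLoopA s lo hi n acc =
        acc ++ (PySem.List.pyRange (max n r1) (max n r2)).map (pvP s) := by
  intro N
  induction N with
  | zero =>
    intro n acc hN hn
    have hr2n : r2 ≤ n := by omega
    have h1 : max n r1 = n := by omega
    have h2 : max n r2 = n := by omega
    rw [pvLoopA, h1, h2]
    have hempty : PySem.List.pyRange n n = [] := by
      simp [PySem.List.pyRange]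
    by_cases hg : hi ≤ n
    · simp [hg, hempty]
    · simp only [hg, if_false, pvNumA_eq s n hs3 hs8]
      have hge : hi ≤ pvP s n := (hhi n hn).mpr hr2n
      simp [hempty, hge, not_lt.mpr hge]
  | succ N ih =>
    intro n acc hN hn
    by_cases hr2n : r2 ≤ n
    · -- same as the base case: the loop stops immediately
      have h1 : max n r1 = n := by omega
      have h2 : max n r2 = n := by omega
      rw [pvLoopA, h1, h2]
      have hempty : PySem.List.pyRange n n = [] := by
        simp [PySem.List.pyRange]
      by_cases hg : hi ≤ n
      · simp [hg, hempty]
      · simp only [hg, if_false, pvNumA_eq s n hs3 hs8]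
        have hge : hi ≤ pvP s n := (hhi n hn).mpr hr2n
        simp [hempty, hge, not_lt.mpr hge]
    · have hnr2 : n < r2 := by omega
      have hg : ¬ hi ≤ n := by omega
      have hPhi : pvP s n < hi := by
        by_contra hc
        exact hnr2.not_ge ((hhi n hn).mp (by omega))
      rw [pvLoopA]
      simp only [hg, if_false, pvNumA_eq s n hs3 hs8]
      have h2 : max n r2 = r2 := by omega
      by_cases hPlo : lo ≤ pvP s n
      · -- appended: r1 ≤ n < r2
        have hr1n : r1 ≤ n := (hlo n hn).mp hPlo
        have h1 : max n r1 = n := by omega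
        simp only [hPlo, hPhi, and_self, if_true]
        rw [ih (n + 1) (acc ++ [pvP s n]) (by omega) (by omega)]
        have h1' : max (n + 1) r1 = n + 1 := by omega
        have h2' : max (n + 1) r2 = r2 := by omega
        rw [h1, h2, h1', h2', PySem.List.pyRange_one_cons hnr2]
        simp
      · -- skipped: n < r1
        have hr1n : r1 > n := by
          by_contra hc
          exact hPlo ((hlo n hn).mpr (by omega))
        simp only [hPlo, false_and, if_false, not_le.mpr hPhi, if_false]
        rw [ih (n + 1) acc (by omega) (by omega)]
        have h1 : max n r1 = r1 := by omega
        have h1' : max (n + 1) r1 = r1 := by omega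
        have h2' : max (n + 1) r2 = r2 := by omega
        rw [h1, h2, h1', h2']

-- ===== VERDICT (by name: the statement is the Claim_ definition above) =====
theorem generate_figurate_numbers_spec : Claim_equal_generate_figurate_numbers := by
  intro s digits _hDom hPre
  obtain ⟨hs3, hs8⟩ := hPre
  unfold Spec_generate_figurate_numbers generate_figurate_numbers generate_figurate_numbers_alt
  set lo := pvPow10 (digits - 1) with hlo_def
  set hi := pvPow10 digits with hhi_def
  have hlo1 : 1 ≤ lo := by
    rw [hlo_def]; unfold pvPow10; exact one_le_pow₀ (by norm_num)
  have hhi1 : 1 ≤ hi := by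
    rw [hhi_def]; unfold pvPow10; exact one_le_pow₀ (by norm_num)
  have hlohi : lo ≤ hi := by
    rw [hlo_def, hhi_def]
    exact pow_le_pow_right₀ (by norm_num) (by omega)
  obtain ⟨hr1a, hr1b, hr1c⟩ := pvFirstAtLeast_spec s lo hs3
  obtain ⟨hr2a, hr2b, hr2c⟩ := pvFirstAtLeast_spec s hi hs3
  set r1 := pvFirstAtLeast s lo
  set r2 := pvFirstAtLeast s hi
  have hr12 : r1 ≤ r2 := by
    by_contra hc
    have := hr1c r2 hr2a (by omega)
    omega
  have hr2hi : r2 ≤ hi := by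
    by_contra hc
    have := hr2c hi hhi1 (by omega)
    have := pvP_ge_self s hi hs3 hhi1
    omega
  have hlo_iff : ∀ n, 1 ≤ n → (lo ≤ pvP s n ↔ r1 ≤ n) := by
    intro n hn
    constructor
    · intro h; by_contra hc; exact absurd (hr1c n hn (by omega)) (by omega)
    · intro h; exact hr1b.trans (pvP_mono s r1 n hs3 hr1a h)
  have hhi_iff : ∀ n, 1 ≤ n → (hi ≤ pvP s n ↔ r2 ≤ n) := by
    intro n hn
    constructor
    · intro h; by_contra hc; exact absurd (hr2c n hn (by omega)) (by omega)
    · intro h; exact hr2b.trans (pvP_mono s r2 n hs3 hr2a h)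
  rw [pvLoopA_eq s lo hi r1 r2 hs3 hs8 hr1a hr12 hr2hi hlo_iff hhi_iff
      (r2 - 1).toNat 1 [] (by omega) le_rfl]
  have h1 : max 1 r1 = r1 := by omega
  have h2 : max 1 r2 = r2 := by omega
  rw [h1, h2]
  simp [hs3, hs8]
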